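-- pv_equiv track=rewrite | github.com/MerelVanEssen/adventOfCode | 2025/06.py | part1
-- ===== SOURCE A (Python) =====
-- def multiplyList(lst):
-- 	result = 1
-- 	for x in lst:
-- 		result = result * x
-- 	return result
--
-- def calculate(nrs, key):
-- 	if key == '+':
-- 		return sum(nrs)
-- 	elif key == '*':
-- 		return multiplyList(nrs)
-- 	return 0
--
-- def part1(lines):
-- 	total = 0
-- 	l = len(lines) - 1
-- 	for j in range(len(lines[0])):
-- 		nrs = []
-- 		for i in range(l + 1):
-- 			nr = lines[i][j]
-- 			if lines[i][j].isdigit():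
-- 				nr = int(lines[i][j])
-- 				nrs.append(nr)
-- 		total += calculate(nrs, lines[l][j])
-- 	return total
-- ===== SOURCE B (Python) =====
-- def _upd(cell, ch):
--     op, v = cell
--     if not ch.isdigit():
--         return cell
--     if op == '+':
--         return (op, v + int(ch))
--     if op == '*':
--         return (op, v * int(ch))
--     return cell
--
-- def part1(lines):
--     width = len(lines[0])
--     acc = []
--     for op in lines[-1][:width]:
--         acc.append((op, 1 if op == '*' else 0))
--     for row in lines:
--         acc = [_upd(cell, ch) for cell, ch in zip(acc, row)]
--     return sum(v for op, v in acc if op in ('+', '*'))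
-- ===== Notes on version B (the rewrite author's own statement) =====
-- stated objective: alternative
-- what changed: Replaces A's column-major pass (building a list of each column's digits, then aggregating it with sum/product) by a single row-major pass that keeps one running accumulator per column (0 for '+' columns, 1 for '*' columns, untouched for others) and finally sums the '+'/'*' accumulators.
import Mathlib
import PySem

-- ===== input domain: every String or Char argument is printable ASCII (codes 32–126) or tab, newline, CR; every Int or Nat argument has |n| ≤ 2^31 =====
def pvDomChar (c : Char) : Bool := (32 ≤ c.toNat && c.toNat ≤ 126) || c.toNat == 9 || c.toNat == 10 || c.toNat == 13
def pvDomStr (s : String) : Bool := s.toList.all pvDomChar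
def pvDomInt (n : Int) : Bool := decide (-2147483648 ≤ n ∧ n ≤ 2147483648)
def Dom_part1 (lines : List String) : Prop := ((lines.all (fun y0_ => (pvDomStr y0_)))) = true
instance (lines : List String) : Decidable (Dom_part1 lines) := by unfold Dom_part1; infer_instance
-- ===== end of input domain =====

-- B replaces A's column-major digit-list building with a row-major single pass over per-column accumulators (alternative decomposition, same cost).


-- ===== PORT A =====
-- int(c) for a one-character string; guarded by isdigit in both ports, so the default is unreachable
def pyIntOfDigit (c : Char) : Int := (PySem.Int.ofChars? [c]).getD 0

def multiplyList (lst : List Int) : Int := lst.foldl (fun result x => result * x) 1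

def calculate (nrs : List Int) (key : Char) : Int :=
  if key = '+' then nrs.sum
  else if key = '*' then multiplyList nrs
  else 0

def part1 (lines : List String) : Int :=
  let l : Int := (lines.length : Int) - 1
  (PySem.List.pyRange 0 (PySem.Str.len (PySem.List.pyGetD lines 0 "")) 1).foldl
    (fun total j =>
      let nrs := (PySem.List.pyRange 0 (l + 1) 1).foldl
        (fun nrs i =>
          let c := PySem.List.pyGetD (PySem.List.pyGetD lines i "").toList j ' '
          if PySem.Chars.isdigit c then nrs ++ [pyIntOfDigit c] else nrs) []
      total + calculate nrs (PySem.List.pyGetD (PySem.List.pyGetD lines l "").toList j ' '))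
    0

-- ===== PORT B =====
def updCell (cell : Char × Int) (ch : Char) : Char × Int :=
  if ¬ (PySem.Chars.isdigit ch) then cell
  else if cell.1 = '+' then (cell.1, cell.2 + pyIntOfDigit ch)
  else if cell.1 = '*' then (cell.1, cell.2 * pyIntOfDigit ch)
  else cell

def part1_alt (lines : List String) : Int :=
  let width : Int := PySem.Str.len (PySem.List.pyGetD lines 0 "")
  let acc0 := (PySem.List.slice (PySem.List.pyGetD lines (-1) "").toList none (some width)).foldl
    (fun acc op => acc ++ [(op, if op = '*' then (1 : Int) else 0)]) []
  let accF := lines.foldl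
    (fun acc row => (acc.zip row.toList).map (fun p => updCell p.1 p.2)) acc0
  (accF.filter (fun p => p.1 = '+' ∨ p.1 = '*')).foldl (fun s p => s + p.2) 0

-- ===== PRECONDITION & SPEC =====
-- Pre_ excludes exactly the inputs on which A raises: an empty lines list (IndexError on lines[0])
-- and grids where some row is shorter than the first row (IndexError on lines[i][j]).
def Pre_part1 (lines : List String) : Prop :=
  lines ≠ [] ∧ ∀ s ∈ lines, (lines.headD "").toList.length ≤ s.toList.length
instance (lines : List String) : Decidable (Pre_part1 lines) := by unfold Pre_part1; infer_instance

def pvWitness_part1 : List String := ["12", "34", "+*"]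

def Spec_part1 (lines : List String) (out : Int) : Prop := out = part1_alt lines
instance (lines : List String) (out : Int) : Decidable (Spec_part1 lines out) := by unfold Spec_part1; infer_instance

-- ===== CLAIM (what is proved, stated in full; the proofs are below) =====
def Claim_equal_part1 : Prop := ∀ (lines : List String), Dom_part1 lines → Pre_part1 lines → Spec_part1 lines (part1 lines)

-- ===== LEMMAS AND PROOFS =====

-- character of a row at column j (both ports read cells through this after normalisation)
def chAt (row : String) (j : Nat) : Char := row.toList.getD j ' '

-- the digits A collects in column j
def colNrs (lines : List String) (j : Nat) : List Int :=
  (lines.filter (fun r => PySem.Chars.isdigit (chAt r j))).map (fun r => pyIntOfDigit (chAt r j))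

theorem updCell_fst (cell : Char × Int) (ch : Char) : (updCell cell ch).1 = cell.1 := by
  unfold updCell; split_ifs <;> rfl

-- row-major fold over a map-over-range initial accumulator = per-column folds
theorem rowMajor_eq_colMajor (w : Nat) :
    ∀ (rows : List String) (g : Nat → Char × Int),
    (∀ r ∈ rows, w ≤ r.toList.length) →
    rows.foldl (fun acc row => (acc.zip row.toList).map (fun p => updCell p.1 p.2))
      ((List.range w).map g)
    = (List.range w).map
        (fun j => rows.foldl (fun cell row => updCell cell (chAt row j)) (g j)) := by
  intro rows
  induction rows with
  | nil => intro g _; simp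
  | cons r rs ih =>
    intro g h
    have hr : w ≤ r.toList.length := h r (by simp)
    have hstep : (((List.range w).map g).zip r.toList).map (fun p => updCell p.1 p.2)
        = (List.range w).map (fun j => updCell (g j) (chAt r j)) := by
      have hr' : w ≤ r.length := by simpa using hr
      apply List.ext_getElem
      · simp [Nat.min_eq_left hr']
      · intro i h1 h2
        have hi : i < w := by simpa using h2
        have hir : i < r.toList.length := lt_of_lt_of_le hi hr
        simp [List.getElem_zip, chAt, List.getD_eq_getElem?_getD, List.getElem?_eq_getElem hir]
    rw [List.foldl_cons, hstep, ih _ (fun x hx => h x (by simp [hx]))]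
    simp

-- a '+' column accumulates the sum of its digits
theorem plusCol (j : Nat) :
    ∀ (rows : List String) (v : Int),
    rows.foldl (fun cell row => updCell cell (chAt row j)) ('+', v)
      = ('+', v + (colNrs rows j).sum) := by
  intro rows
  induction rows with
  | nil => intro v; simp [colNrs]
  | cons r rs ih =>
    intro v
    rw [List.foldl_cons]
    by_cases hd : PySem.Chars.isdigit (chAt r j)
    · rw [show updCell ('+', v) (chAt r j) = ('+', v + pyIntOfDigit (chAt r j)) from by
        simp [updCell, hd], ih]
      simp [colNrs, hd, add_assoc]
    · rw [show updCell ('+', v) (chAt r j) = ('+', v) from by simp [updCell, hd], ih]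
      simp [colNrs, hd]

-- a '*' column accumulates the product of its digits
theorem starCol (j : Nat) :
    ∀ (rows : List String) (v : Int),
    rows.foldl (fun cell row => updCell cell (chAt row j)) ('*', v)
      = ('*', (colNrs rows j).foldl (fun a x => a * x) v) := by
  intro rows
  induction rows with
  | nil => intro v; simp [colNrs]
  | cons r rs ih =>
    intro v
    rw [List.foldl_cons]
    by_cases hd : PySem.Chars.isdigit (chAt r j)
    · rw [show updCell ('*', v) (chAt r j) = ('*', v * pyIntOfDigit (chAt r j)) from by
        simp [updCell, hd], ih]
      simp [colNrs, hd]
    · rw [show updCell ('*', v) (chAt r j) = ('*', v) from by simp [updCell, hd], ih]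
      simp [colNrs, hd]

theorem filter_sum_eq (f : Char × Int → Int) (p : Char × Int → Bool) :
    ∀ (l : List (Char × Int)),
    ((l.filter p).map f).sum = (l.map (fun x => if p x then f x else 0)).sum := by
  intro l
  induction l with
  | nil => rfl
  | cons x xs ih => by_cases h : p x <;> simp [h, ih]

theorem foldl_fst (j : Nat) (rows : List String) (c : Char × Int) :
    (rows.foldl (fun cell row => updCell cell (chAt row j)) c).1 = c.1 := by
  induction rows generalizing c with
  | nil => rfl
  | cons r rs ih => rw [List.foldl_cons, ih, updCell_fst]

theorem part1_eq (lines : List String) (hpre : Pre_part1 lines) :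
    part1 lines = part1_alt lines := by
  obtain ⟨hne, hlen⟩ := hpre
  have hne' : lines ≠ [] := hne
  set w : Nat := (lines.headD "").toList.length with hw
  have hlen' : ∀ r ∈ lines, w ≤ r.toList.length := hlen
  have hget0 : PySem.List.pyGetD lines 0 "" = lines.headD "" := by
    cases lines with
    | nil => exact absurd rfl hne
    | cons a l => simp [PySem.List.pyGetD_zero_cons]
  have hlast : PySem.List.pyGetD lines (-1) "" = lines.getLast hne :=
    PySem.List.pyGetD_neg_one lines "" hne
  have hlastlen : w ≤ (lines.getLast hne).toList.length :=
    hlen' _ (List.getLast_mem _)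
  have hlastD : PySem.List.pyGetD lines ((lines.length : Int) - 1) ""
      = lines.getLast hne := by
    have hpos : 1 ≤ lines.length := List.length_pos_iff.mpr hne
    have h1 : ((lines.length : Int) - 1) = ((lines.length - 1 : Nat) : Int) := by omega
    rw [h1, PySem.List.pyGetD_natCast, List.getLast_eq_getElem]
    exact List.getD_eq_getElem _ _ (by omega)
  -- ===== A's value, column-major =====
  have hA : part1 lines
      = ((List.range w).map (fun j =>
          calculate (colNrs lines j) (chAt (lines.getLast hne) j))).sum := by
    unfold part1
    simp only [hget0, hlastD, PySem.Str.len_eq, ← hw]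
    have hinner : ∀ j : Int,
        (PySem.List.pyRange 0 ((lines.length : Int) - 1 + 1) 1).foldl
          (fun nrs i =>
            let c := PySem.List.pyGetD (PySem.List.pyGetD lines i "").toList j ' '
            if PySem.Chars.isdigit c then nrs ++ [pyIntOfDigit c] else nrs) []
        = lines.foldl
            (fun nrs r =>
              let c := PySem.List.pyGetD r.toList j ' '
              if PySem.Chars.isdigit c then nrs ++ [pyIntOfDigit c] else nrs) [] := by
      intro j
      have hr : ((lines.length : Int) - 1 + 1) = PySem.List.len lines := by
        simp [PySem.List.len]
      rw [hr]
      simpa using PySem.List.foldl_pyRange_pyGetD lines ""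
        (fun nrs (r : String) =>
          let c := PySem.List.pyGetD r.toList j ' '
          if PySem.Chars.isdigit c then nrs ++ [pyIntOfDigit c] else nrs) [] (le_refl 0)
    simp only [hinner]
    rw [PySem.List.pyRange_zero_nat w, List.foldl_map, PySem.List.foldl_add]
    simp only [zero_add]
    apply congrArg
    apply List.map_congr_left
    intro j hj
    have hcol : ∀ r : String,
        PySem.List.pyGetD r.toList ((j : Nat) : Int) ' ' = chAt r j := by
      intro r; simp [chAt, PySem.List.pyGetD_natCast]
    simp only [hcol]
    apply congrFun
    apply congrArg
    rw [show (fun (nrs : List Int) (r : String) =>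
          if PySem.Chars.isdigit (chAt r j) then nrs ++ [pyIntOfDigit (chAt r j)] else nrs)
        = (fun (nrs : List Int) (r : String) =>
          if (fun r => PySem.Chars.isdigit (chAt r j)) r = true
          then nrs ++ [(fun r => pyIntOfDigit (chAt r j)) r] else nrs) from by
        funext nrs r; simp]
    rw [PySem.List.foldl_append_if (fun r => PySem.Chars.isdigit (chAt r j))
      (fun r => pyIntOfDigit (chAt r j)) lines []]
    simp [colNrs]
  -- ===== B's value, column-major =====
  have hB : part1_alt lines
      = ((List.range w).map (fun j =>
          if (chAt (lines.getLast hne) j) = '+' ∨ (chAt (lines.getLast hne) j) = '*' then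
            (lines.foldl (fun cell row => updCell cell (chAt row j))
              (chAt (lines.getLast hne) j,
               if (chAt (lines.getLast hne) j) = '*' then (1 : Int) else 0)).2
          else 0)).sum := by
    unfold part1_alt
    simp only [hget0, hlast, PySem.Str.len_eq, ← hw]
    rw [PySem.List.slice_to_natCast, PySem.List.foldl_append_singleton_eq_map, List.nil_append]
    have hinit : List.map (fun op => (op, if op = '*' then (1 : Int) else 0))
        (List.take w (lines.getLast hne).toList)
        = (List.range w).map (fun j =>
            (chAt (lines.getLast hne) j,
             if (chAt (lines.getLast hne) j) = '*' then (1 : Int) else 0)) := by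
      have hlastlen' : w ≤ (lines.getLast hne).length := by simpa using hlastlen
      apply List.ext_getElem
      · simp [Nat.min_eq_left hlastlen']
      · intro i h1 h2
        have hi : i < w := by simpa using h2
        have hir : i < (lines.getLast hne).toList.length := lt_of_lt_of_le hi hlastlen
        simp [chAt, List.getD_eq_getElem?_getD, List.getElem?_eq_getElem hir]
    rw [hinit, rowMajor_eq_colMajor w lines _ hlen', PySem.List.foldl_add, zero_add,
      filter_sum_eq (fun p => p.2) (fun p => decide (p.1 = '+' ∨ p.1 = '*')), List.map_map]
    apply congrArg
    apply List.map_congr_left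
    intro j hj
    have hfst := foldl_fst j lines
      (chAt (lines.getLast hne) j,
       if (chAt (lines.getLast hne) j) = '*' then (1 : Int) else 0)
    simp only [Function.comp]
    rw [hfst]
    by_cases hop : (chAt (lines.getLast hne) j) = '+' ∨ (chAt (lines.getLast hne) j) = '*'
    · simp [hop]
    · simp [hop]
  -- ===== combine =====
  rw [hA, hB]
  apply congrArg
  apply List.map_congr_left
  intro j hj
  by_cases hp : chAt (lines.getLast hne) j = '+'
  · rw [if_pos (Or.inl hp)]
    have h2 : (if chAt (lines.getLast hne) j = '*' then (1 : Int) else 0) = 0 := by simp [hp]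
    rw [h2, hp, plusCol j lines 0]
    simp [calculate]
  · by_cases hs : chAt (lines.getLast hne) j = '*'
    · rw [if_pos (Or.inr hs)]
      have h2 : (if chAt (lines.getLast hne) j = '*' then (1 : Int) else 0) = 1 := by simp [hs]
      rw [h2, hs, starCol j lines 1]
      simp [calculate, multiplyList]
    · rw [if_neg (by tauto)]
      simp [calculate, hp, hs]

-- ===== VERDICT (by name: the statement is the Claim_ definition above) =====
theorem part1_spec : Claim_equal_part1 := by
  intro lines _ hpre
  unfold Spec_part1
  exact part1_eq lines hpre
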